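-- pv_equiv track=rewrite | github.com/AdamZhouSE/pythonHomework | Code/CodeRecords/2616/58822/280058.py | isD
-- ===== SOURCE A (Python) =====
-- def isD(a,b):
--     if a==1:
--         if b==1:
--             return 1
--         else:
--             return 0
--     if(b==2 and a!=1):
--         return 1
--     sum=0
--     for i in range(1,b+1):
--         sum=sum+i
--     if(sum<=a):
--         return 1
--     else:
--         return 0
-- ===== SOURCE B (Python) =====
-- def isD(a, b):
--     # Branch-free core: clamp b to t = max(b, 0); the triangular sum of
--     # range(1, b+1) is t*(t+1)//2, and since t*(t+1) is even the test
--     # sum <= a is exactly t*(t+1) <= 2*a (no division, no loop).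
--     t = max(b, 0)
--     ok = (b == 1) if a == 1 else (b == 2 or t * (t + 1) <= 2 * a)
--     return 1 if ok else 0
-- ===== Notes on version B (the rewrite author's own statement) =====
-- stated objective: faster
-- what changed: Replaces the O(b) summation loop with a division-free O(1) test: clamp b to t=max(b,0) and compare t*(t+1) <= 2*a (valid because the triangular sum equals t*(t+1)/2 and t*(t+1) is even), folding all branches into one boolean expression.
import Mathlib
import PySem

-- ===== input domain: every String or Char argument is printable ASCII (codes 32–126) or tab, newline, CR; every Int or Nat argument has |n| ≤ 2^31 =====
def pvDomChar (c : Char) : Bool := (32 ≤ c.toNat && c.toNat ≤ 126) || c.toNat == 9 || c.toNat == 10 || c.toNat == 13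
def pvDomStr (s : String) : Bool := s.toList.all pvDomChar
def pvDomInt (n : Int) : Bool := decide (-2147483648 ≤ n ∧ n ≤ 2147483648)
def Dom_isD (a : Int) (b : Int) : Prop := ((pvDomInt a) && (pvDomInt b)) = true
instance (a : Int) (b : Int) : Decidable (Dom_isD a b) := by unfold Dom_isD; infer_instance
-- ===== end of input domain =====

-- B replaces A's O(b) summation loop by the division-free O(1) test max(b,0)*(max(b,0)+1) ≤ 2*a, folded into one boolean expression (objective: faster).

-- ===== PORT A =====
def isD (a : Int) (b : Int) : Int :=
  if a = 1 then
    if b = 1 then 1 else 0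
  else if b = 2 ∧ a ≠ 1 then 1
  else
    let sum := (PySem.List.pyRange 1 (b+1) 1).foldl (fun s i => s + i) 0
    if sum ≤ a then 1 else 0

-- ===== PORT B =====
def isD_alt (a : Int) (b : Int) : Int :=
  let t := max b 0
  let ok : Bool := if a = 1 then b == 1 else (b == 2 || decide (t * (t + 1) ≤ 2 * a))
  if ok then 1 else 0

-- ===== PRECONDITION & SPEC =====
def Spec_isD (a : Int) (b : Int) (out : Int) : Prop := out = isD_alt a b
instance (a : Int) (b : Int) (out : Int) : Decidable (Spec_isD a b out) := by unfold Spec_isD; infer_instance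

-- ===== CLAIM (what is proved, stated in full; the proofs are below) =====
def Claim_equal_isD : Prop := ∀ (a : Int) (b : Int), Dom_isD a b → Spec_isD a b (isD a b)

-- ===== LEMMAS AND PROOFS =====

-- A's fold over range(1, n+1) is the triangular number n(n+1)/2
lemma sum_pyRange_tri (n : Nat) :
    (PySem.List.pyRange 1 ((n : Int) + 1) 1).foldl (fun s i => s + i) 0
      = ((n : Int) * ((n : Int) + 1)) / 2 := by
  induction n with
  | zero => simp [PySem.List.pyRange_one_eq_nil]
  | succ n ih =>
    have hsplit : PySem.List.pyRange 1 (((n + 1 : Nat) : Int) + 1) 1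
        = PySem.List.pyRange 1 ((n : Int) + 1) 1 ++ [(n : Int) + 1] := by
      have hcast : ((n + 1 : Nat) : Int) + 1 = ((n : Int) + 1) + 1 := by push_cast; ring
      rw [hcast]
      exact PySem.List.pyRange_one_succ_right (by omega)
    rw [hsplit, List.foldl_append, ih]
    have hnum : ((n + 1 : Nat) : Int) * (((n + 1 : Nat) : Int) + 1)
        = (n : Int) * ((n : Int) + 1) + ((n : Int) + 1) * 2 := by push_cast; ring
    rw [hnum, Int.add_mul_ediv_right _ _ (by norm_num)]
    simp

-- the comparisons n(n+1)/2 ≤ a and n(n+1) ≤ 2a agree (n(n+1) is even)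
lemma tri_le_iff (n a : Int) (_ : 0 ≤ n) : (n * (n + 1)) / 2 ≤ a ↔ n * (n + 1) ≤ 2 * a := by
  have heven : Even (n * (n + 1)) := Int.even_mul_succ_self n
  obtain ⟨k, hk⟩ := heven
  have hk2 : n * (n + 1) = 2 * k := by omega
  rw [hk2]
  omega

-- ===== VERDICT (by name: the statement is the Claim_ definition above) =====
theorem isD_spec : Claim_equal_isD := by
  intro a b _
  unfold Spec_isD isD isD_alt
  by_cases ha : a = 1
  · by_cases hb1 : b = 1 <;> simp [ha, hb1]
  · by_cases hb2 : b = 2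
    · simp [ha, hb2]
    · simp only [ha, hb2, if_neg, not_false_iff, and_true, ne_eq, beq_iff_eq, Bool.or_eq_true,
        decide_eq_true_eq]
      by_cases hbpos : 0 < b
      · have hb : b = ((b.toNat : Int)) := by omega
        rw [show (b + 1) = ((b.toNat : Int) + 1) by omega, sum_pyRange_tri b.toNat]
        have hmax : max b 0 = b := by omega
        rw [hmax, ← hb]
        have := tri_le_iff b a (by omega)
        by_cases h : b * (b + 1) ≤ 2 * a <;> simp [h, this]
      · have hnil : PySem.List.pyRange 1 (b + 1) 1 = [] :=
          PySem.List.pyRange_one_eq_nil (by omega)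
        have hmax : max b 0 = 0 := by omega
        simp only [hnil, List.foldl_nil, hmax]
        by_cases h : (0:Int) ≤ a <;> simp [h]
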